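-- pv_equiv track=rewrite | github.com/jorgequintino/MC102-PAD-2024 | lab11/lab11.py | radiardiagonal
-- ===== SOURCE A (Python) =====
-- def ehdiagonal(matriz, radiatividade, coordlinha, coordcoluna, linha, coluna):
--   horizontal = coordlinha - linha
--   if horizontal<0:
--     horizontal = linha-coordlinha
--   vertical = coordcoluna-coluna
--   if vertical<0:
--     vertical = coluna-coordcoluna
--   if horizontal==vertical and coordlinha!=linha and coordcoluna!=coluna:
--     return True
--   return False
--
-- def radiardiagonal(terrenoradioativo, coordlinha, coordcoluna, radioatividade):
--   for linha in range(len(terrenoradioativo)):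
--     for coluna in range(len(terrenoradioativo[linha])):
--       if ehdiagonal(terrenoradioativo, radioatividade, coordlinha, coordcoluna, linha, coluna):
--         if (coordcoluna-coluna)>0:
--           terrenoradioativo[linha][coluna] = radiaroponto(coordcoluna, coluna, radioatividade)
--         else:
--           terrenoradioativo[linha][coluna] = radiaroponto(coluna, coordcoluna, radioatividade)
--   return terrenoradioativo
--
-- def radiaroponto(primeira, segunda, valor):
--   diminuiu = (primeira-segunda)
--   if valor - diminuiu<0:
--     variacao = 0
--   else:
--     variacao = valor - diminuiu
--   return variacao
-- ===== SOURCE B (Python) =====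
-- def radiardiagonal(terrenoradioativo, coordlinha, coordcoluna, radioatividade):
--     # walks only the two diagonals through (coordlinha, coordcoluna), row by row
--     for linha, row in enumerate(terrenoradioativo):
--         if linha == coordlinha:
--             continue
--         d = abs(linha - coordlinha)
--         v = radioatividade - d
--         if v < 0:
--             v = 0
--         for coluna in (coordcoluna - d, coordcoluna + d):
--             if 0 <= coluna < len(row):
--                 row[coluna] = v
--     return terrenoradioativo
-- ===== Notes on version B (the rewrite author's own statement) =====
-- stated objective: faster
-- what changed: Instead of scanning every cell of the matrix and testing it for diagonality, B visits each row once and writes only the (at most) two diagonal cells coordcoluna±|linha-coordlinha| of that row after a bounds check, computing the new value max(0, radioatividade-distance) directly.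
import Mathlib
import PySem

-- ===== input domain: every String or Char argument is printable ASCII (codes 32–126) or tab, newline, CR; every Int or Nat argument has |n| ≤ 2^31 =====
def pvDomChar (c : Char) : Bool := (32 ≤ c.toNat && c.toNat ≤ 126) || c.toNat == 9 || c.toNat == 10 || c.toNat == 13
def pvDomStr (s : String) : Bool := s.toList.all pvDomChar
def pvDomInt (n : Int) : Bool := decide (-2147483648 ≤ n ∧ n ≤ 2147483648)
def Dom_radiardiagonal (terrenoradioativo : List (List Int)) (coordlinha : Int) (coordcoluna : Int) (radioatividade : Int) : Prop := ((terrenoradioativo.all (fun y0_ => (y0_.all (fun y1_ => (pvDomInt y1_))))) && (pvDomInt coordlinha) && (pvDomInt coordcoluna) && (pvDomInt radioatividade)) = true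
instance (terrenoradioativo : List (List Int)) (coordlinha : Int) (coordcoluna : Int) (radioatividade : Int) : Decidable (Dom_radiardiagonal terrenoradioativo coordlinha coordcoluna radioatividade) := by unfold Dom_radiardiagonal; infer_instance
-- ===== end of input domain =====

-- B walks only the two diagonals through the centre (two bounds-checked cells per row)
-- instead of scanning every cell; the equivalence proved is about the returned value
-- (both Pythons also mutate the argument in place, identically).

-- ===== PORT A =====
def ehdiagonal (_matriz : List (List Int)) (_radiatividade coordlinha coordcoluna linha coluna : Int) : Bool :=
  let horizontal := coordlinha - linha
  let horizontal := if horizontal < 0 then linha - coordlinha else horizontal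
  let vertical := coordcoluna - coluna
  let vertical := if vertical < 0 then coluna - coordcoluna else vertical
  if horizontal == vertical && coordlinha != linha && coordcoluna != coluna then true else false

def radiaroponto (primeira segunda valor : Int) : Int :=
  let diminuiu := primeira - segunda
  if valor - diminuiu < 0 then 0 else valor - diminuiu

-- terrenoradioativo[linha][coluna] = v  (indices come from range(len(..)), hence nonnegative and in range)
def setCell (m : List (List Int)) (i j : Nat) (v : Int) : List (List Int) :=
  m.set i ((m.getD i []).set j v)

def radiardiagonal (terrenoradioativo : List (List Int)) (coordlinha : Int) (coordcoluna : Int) (radioatividade : Int) : List (List Int) :=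
  (List.range terrenoradioativo.length).foldl (fun (acc : List (List Int)) (linha : Nat) =>
    (List.range (acc.getD linha []).length).foldl (fun (acc2 : List (List Int)) (coluna : Nat) =>
      if ehdiagonal acc2 radioatividade coordlinha coordcoluna (linha : Int) (coluna : Int) then
        setCell acc2 linha coluna
          (if coordcoluna - (coluna : Int) > 0 then radiaroponto coordcoluna coluna radioatividade
           else radiaroponto coluna coordcoluna radioatividade)
      else acc2) acc) terrenoradioativo

-- ===== PORT B =====
def altRow (coordlinha coordcoluna radioatividade : Int) (linha : Nat) (row : List Int) : List Int :=
  if (linha : Int) = coordlinha then row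
  else
    let d : Int := ((linha : Int) - coordlinha).natAbs
    let v := radioatividade - d
    let v := if v < 0 then 0 else v
    let row1 := if 0 ≤ coordcoluna - d ∧ coordcoluna - d < (row.length : Int)
                then row.set (coordcoluna - d).toNat v else row
    if 0 ≤ coordcoluna + d ∧ coordcoluna + d < (row1.length : Int)
    then row1.set (coordcoluna + d).toNat v else row1

def radiardiagonal_alt (terrenoradioativo : List (List Int)) (coordlinha : Int) (coordcoluna : Int) (radioatividade : Int) : List (List Int) :=
  terrenoradioativo.mapIdx (fun linha row => altRow coordlinha coordcoluna radioatividade linha row)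

-- ===== PRECONDITION & SPEC =====
def Spec_radiardiagonal (terrenoradioativo : List (List Int)) (coordlinha : Int) (coordcoluna : Int) (radioatividade : Int) (out : List (List Int)) : Prop := out = radiardiagonal_alt terrenoradioativo coordlinha coordcoluna radioatividade
instance (terrenoradioativo : List (List Int)) (coordlinha : Int) (coordcoluna : Int) (radioatividade : Int) (out : List (List Int)) : Decidable (Spec_radiardiagonal terrenoradioativo coordlinha coordcoluna radioatividade out) := by unfold Spec_radiardiagonal; infer_instance

-- ===== CLAIM (what is proved, stated in full; the proofs are below) =====
def Claim_equal_radiardiagonal : Prop := ∀ (terrenoradioativo : List (List Int)) (coordlinha : Int) (coordcoluna : Int) (radioatividade : Int), Dom_radiardiagonal terrenoradioativo coordlinha coordcoluna radioatividade → Spec_radiardiagonal terrenoradioativo coordlinha coordcoluna radioatividade (radiardiagonal terrenoradioativo coordlinha coordcoluna radioatividade)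

-- ===== LEMMAS AND PROOFS =====

-- A's diagonal test, with the unused matrix/radioactivity parameters dropped
def condB (coordlinha coordcoluna : Int) (linha coluna : Nat) : Bool :=
  ehdiagonal [] 0 coordlinha coordcoluna (linha : Int) (coluna : Int)

-- A's per-cell new value
def valB (coordcoluna radioatividade : Int) (coluna : Nat) : Int :=
  if coordcoluna - (coluna : Int) > 0 then radiaroponto coordcoluna coluna radioatividade
  else radiaroponto coluna coordcoluna radioatividade

-- A's inner loop, restricted to a single row
def rowA (coordlinha coordcoluna radioatividade : Int) (linha : Nat) (row : List Int) : List Int :=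
  (List.range row.length).foldl
    (fun s c => if condB coordlinha coordcoluna linha c then s.set c (valB coordcoluna radioatividade c) else s) row

lemma condB_iff (cl cc : Int) (l c : Nat) :
    condB cl cc l c = true ↔ ((cl - l).natAbs = (cc - c).natAbs ∧ cl ≠ (l : Int) ∧ cc ≠ (c : Int)) := by
  simp only [condB, ehdiagonal, bne, Bool.and_eq_true, beq_iff_eq, Bool.not_eq_true', beq_eq_false_iff_ne]
  split_ifs <;> simp <;> omega

lemma ehdiagonal_irrel (m : List (List Int)) (rad cl cc : Int) (l c : Nat) :
    ehdiagonal m rad cl cc (l : Int) (c : Int) = condB cl cc l c := by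
  simp [ehdiagonal, condB]

-- a fold of per-cell writes into a fixed row equals setting the rewritten row once
lemma inner_set (cond : Nat → Bool) (val : Nat → Int) (linha : Nat) :
    ∀ (L : List Nat) (acc : List (List Int)),
    L.foldl (fun m c => if cond c then setCell m linha c (val c) else m) acc
      = acc.set linha (L.foldl (fun row c => if cond c then row.set c (val c) else row) (acc.getD linha [])) := by
  intro L
  induction L with
  | nil =>
      intro acc
      by_cases h : linha < acc.length
      · simp [List.getD, List.getElem?_eq_getElem h, List.set_getElem_self]
      · simp [List.set_eq_of_length_le (show acc.length ≤ linha by omega)]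
  | cons c L ih =>
      intro acc
      simp only [List.foldl_cons]
      by_cases h : cond c
      · simp only [h, if_true]
        rw [ih]
        unfold setCell
        by_cases hl : linha < acc.length
        · simp [List.getD, hl, List.set_set]
        · simp [List.set_eq_of_length_le (show acc.length ≤ linha by omega), List.getD]
      · simp only [h]
        exact ih acc

-- pointwise description of a range-fold of guarded in-row writes
lemma fold_set_spec (cond : Nat → Bool) (val : Nat → Int) :
    ∀ (k : Nat) (row : List Int),
    ((List.range k).foldl (fun s c => if cond c then s.set c (val c) else s) row).length = row.length ∧
    ∀ j : Nat,
      ((List.range k).foldl (fun s c => if cond c then s.set c (val c) else s) row)[j]?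
        = if j < k ∧ cond j = true ∧ j < row.length then some (val j) else row[j]? := by
  intro k
  induction k with
  | zero => intro row; simp
  | succ k ih =>
      intro row
      obtain ⟨hlen, helem⟩ := ih row
      simp only [List.range_succ, List.foldl_append, List.foldl_cons, List.foldl_nil]
      by_cases h : cond k
      · simp only [h, if_true]
        refine ⟨by simp only [List.length_set]; exact hlen, fun j => ?_⟩
        rw [List.getElem?_set, hlen, helem]
        by_cases hkj : k = j
        · subst hkj
          by_cases hjl : k < row.length
          · simp [hjl, h]
          · simp [hjl]
        · rw [if_neg hkj]
          refine if_congr ?_ rfl rfl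
          constructor
          · rintro ⟨h1, h2, h3⟩; exact ⟨by omega, h2, h3⟩
          · rintro ⟨h1, h2, h3⟩; exact ⟨by omega, h2, h3⟩
      · simp only [h, Bool.false_eq_true, if_false]
        refine ⟨hlen, fun j => ?_⟩
        rw [helem]
        refine if_congr ?_ rfl rfl
        constructor
        · rintro ⟨h1, h2, h3⟩; exact ⟨by omega, h2, h3⟩
        · rintro ⟨h1, h2, h3⟩
          refine ⟨?_, h2, h3⟩
          rcases Nat.lt_or_ge j k with hlt | hge
          · exact hlt
          · exact absurd (show cond k = true by rwa [show k = j by omega]) h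

-- pointwise description of the outer row-by-row fold
lemma fold_rows_spec (g : Nat → List Int → List Int) :
    ∀ (k : Nat) (t : List (List Int)), k ≤ t.length →
    ((List.range k).foldl (fun acc i => acc.set i (g i (acc.getD i []))) t).length = t.length ∧
    ∀ i : Nat,
      ((List.range k).foldl (fun acc i => acc.set i (g i (acc.getD i []))) t)[i]?
        = if i < k then (t[i]?.map (g i)) else t[i]? := by
  intro k
  induction k with
  | zero => intro t _; simp
  | succ k ih =>
      intro t hk
      obtain ⟨hlen, helem⟩ := ih t (by omega)
      simp only [List.range_succ, List.foldl_append, List.foldl_cons, List.foldl_nil]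
      have hk' : k < t.length := by omega
      have hget : ((List.range k).foldl (fun acc i => acc.set i (g i (acc.getD i []))) t).getD k []
          = t[k] := by
        rw [List.getD, helem, if_neg (by omega), List.getElem?_eq_getElem hk']
        rfl
      refine ⟨by simp only [List.length_set]; exact hlen, fun i => ?_⟩
      rw [hget, List.getElem?_set, hlen, helem]
      by_cases hik : k = i
      · subst hik
        simp [hk']
      · simp only [if_neg hik]
        split_ifs <;> first | rfl | omega

-- element description of B's two bounds-checked writes into one row
lemma altRow_getElem (cc D v : Int) (hD : 1 ≤ D) (row : List Int) (j : Nat) :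
    (if 0 ≤ cc + D ∧ cc + D < (((if 0 ≤ cc - D ∧ cc - D < (row.length : Int)
          then row.set (cc - D).toNat v else row)).length : Int)
     then (if 0 ≤ cc - D ∧ cc - D < (row.length : Int)
          then row.set (cc - D).toNat v else row).set (cc + D).toNat v
     else (if 0 ≤ cc - D ∧ cc - D < (row.length : Int)
          then row.set (cc - D).toNat v else row))[j]?
    = if ((j : Int) = cc - D ∨ (j : Int) = cc + D) ∧ j < row.length then some v else row[j]? := by
  by_cases g1 : 0 ≤ cc - D ∧ cc - D < (row.length : Int)
  · rw [if_pos g1]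
    by_cases g2 : 0 ≤ cc + D ∧ cc + D < ((row.set (cc - D).toNat v).length : Int)
    · rw [if_pos g2, List.getElem?_set, List.length_set, List.getElem?_set]
      rw [List.length_set] at g2
      by_cases e2 : (cc + D).toNat = j
      · rw [if_pos e2, if_pos (by omega), if_pos ⟨Or.inr (by omega), by omega⟩]
      · rw [if_neg e2]
        by_cases e1 : (cc - D).toNat = j
        · rw [if_pos e1, if_pos (by omega), if_pos ⟨Or.inl (by omega), by omega⟩]
        · rw [if_neg e1, if_neg (by rintro ⟨h1 | h1, h2⟩ <;> omega)]
    · rw [if_neg g2, List.getElem?_set]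
      rw [List.length_set] at g2
      by_cases e1 : (cc - D).toNat = j
      · rw [if_pos e1, if_pos (by omega), if_pos ⟨Or.inl (by omega), by omega⟩]
      · rw [if_neg e1, if_neg (by rintro ⟨h1 | h1, h2⟩ <;> omega)]
  · rw [if_neg g1]
    by_cases g2 : 0 ≤ cc + D ∧ cc + D < (row.length : Int)
    · rw [if_pos g2, List.getElem?_set]
      by_cases e2 : (cc + D).toNat = j
      · rw [if_pos e2, if_pos (by omega), if_pos ⟨Or.inr (by omega), by omega⟩]
      · rw [if_neg e2, if_neg (by rintro ⟨h1 | h1, h2⟩ <;> omega)]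
    · rw [if_neg g2, if_neg (by rintro ⟨h1 | h1, h2⟩ <;> omega)]

lemma row_eq (cl cc r : Int) (linha : Nat) (row : List Int) :
    rowA cl cc r linha row = altRow cl cc r linha row := by
  obtain ⟨hlen, helem⟩ := fold_set_spec (fun c => condB cl cc linha c) (fun c => valB cc r c) row.length row
  by_cases hcl : (linha : Int) = cl
  · apply List.ext_getElem?
    intro j
    rw [show altRow cl cc r linha row = row by simp [altRow, hcl]]
    rw [rowA, helem]
    have : condB cl cc linha j = false := by
      rw [Bool.eq_false_iff]
      intro hc
      exact ((condB_iff cl cc linha j).mp hc).2.1 hcl.symm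
    simp [this]
  · have hD : (1 : Int) ≤ (((linha : Int) - cl).natAbs : Int) := by omega
    apply List.ext_getElem?
    intro j
    rw [rowA, helem]
    simp only [altRow, if_neg hcl]
    rw [altRow_getElem cc _ _ hD row j]
    by_cases hc : condB cl cc linha j = true
    · obtain ⟨habs, hne1, hne2⟩ := (condB_iff cl cc linha j).mp hc
      by_cases hjl : j < row.length
      · rw [if_pos ⟨hjl, hc, hjl⟩, if_pos ⟨by omega, hjl⟩]
        refine congrArg some ?_
        simp only [valB, radiaroponto]
        split_ifs <;> omega
      · rw [if_neg (fun h => hjl h.1), if_neg (fun h => hjl h.2)]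
    · have hnot : ¬(((j : Int) = cc - (((linha : Int) - cl).natAbs : Int) ∨
          (j : Int) = cc + (((linha : Int) - cl).natAbs : Int)) ∧ j < row.length) := by
        rintro ⟨hj, hjl⟩
        exact hc ((condB_iff cl cc linha j).mpr ⟨by omega, fun e => hcl e.symm, by omega⟩)
      rw [if_neg (fun h => hc h.2.1), if_neg hnot]

theorem radiardiagonal_eq_alt (t : List (List Int)) (cl cc r : Int) :
    radiardiagonal t cl cc r = radiardiagonal_alt t cl cc r := by
  unfold radiardiagonal radiardiagonal_alt
  have hbody : (fun (acc : List (List Int)) (linha : Nat) =>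
      (List.range (acc.getD linha []).length).foldl (fun (acc2 : List (List Int)) (coluna : Nat) =>
        if ehdiagonal acc2 r cl cc (linha : Int) (coluna : Int) then
          setCell acc2 linha coluna
            (if cc - (coluna : Int) > 0 then radiaroponto cc coluna r
             else radiaroponto coluna cc r)
        else acc2) acc)
      = fun (acc : List (List Int)) (linha : Nat) =>
          acc.set linha (rowA cl cc r linha (acc.getD linha [])) := by
    funext acc linha
    have hfun : (fun (acc2 : List (List Int)) (coluna : Nat) =>
        if ehdiagonal acc2 r cl cc (linha : Int) (coluna : Int) then
          setCell acc2 linha coluna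
            (if cc - (coluna : Int) > 0 then radiaroponto cc coluna r
             else radiaroponto coluna cc r)
        else acc2)
        = fun (m : List (List Int)) (c : Nat) =>
            if condB cl cc linha c then setCell m linha c (valB cc r c) else m := by
      funext m c
      rw [ehdiagonal_irrel]
      rfl
    rw [hfun, inner_set]
    rfl
  rw [hbody]
  obtain ⟨hlen, helem⟩ := fold_rows_spec (fun i row => rowA cl cc r i row) t.length t le_rfl
  apply List.ext_getElem?
  intro i
  rw [helem, List.getElem?_mapIdx]
  by_cases hi : i < t.length
  · rw [if_pos hi]
    cases t[i]? with
    | none => rfl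
    | some row => simp [row_eq]
  · rw [if_neg hi, (List.getElem?_eq_none_iff (l := t)).mpr (by omega)]
    rfl

-- ===== VERDICT (by name: the statement is the Claim_ definition above) =====
theorem radiardiagonal_spec : Claim_equal_radiardiagonal := by
  intro t cl cc r _
  unfold Spec_radiardiagonal
  exact radiardiagonal_eq_alt t cl cc r
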